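-- pv_equiv track=rewrite | github.com/Gustav0Prado/cursos | otimizacao/t2/src/hero.py | num_conflicts
-- ===== SOURCE A (Python) =====
-- def num_conflicts(left:list, right:list, conflicts:set) -> int:
--    """Calcula o número total de conflitos nos dois grupos de heróis
--
--    Args:
--        left (list): Grupo do "lado esquerdo"
--        right (list): Grupo do "lado direito"
--
--    Returns:
--        int: Número de conflitos
--    """
--    conf = 0
--
--    for hero in left:
--       for (l, r) in conflicts:
--          if hero == l and r in left:
--             conf += 1
--
--    for hero in right:
--       for (l, r) in conflicts:
--          if hero == l and r in right:
--             conf += 1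
--
--    return conf
-- ===== SOURCE B (Python) =====
-- def num_conflicts(left: list, right: list, conflicts: set) -> int:
--     """Count conflicts per group: multiplicity counters + one pass over conflicts."""
--     cl = {}
--     for h in left:
--         cl[h] = cl.get(h, 0) + 1
--     cr = {}
--     for h in right:
--         cr[h] = cr.get(h, 0) + 1
--     conf = 0
--     for (l, r) in conflicts:
--         if r in cl:
--             conf += cl.get(l, 0)
--         if r in cr:
--             conf += cr.get(l, 0)
--     return conf
-- ===== Notes on version B (the rewrite author's own statement) =====
-- stated objective: faster
-- what changed: B replaces A's nested per-hero rescans of conflicts by building a multiplicity counter per group and then making one pass over conflicts, adding count_group(l) whenever r is in the group — the hero loops disappear entirely.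
import Mathlib
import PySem

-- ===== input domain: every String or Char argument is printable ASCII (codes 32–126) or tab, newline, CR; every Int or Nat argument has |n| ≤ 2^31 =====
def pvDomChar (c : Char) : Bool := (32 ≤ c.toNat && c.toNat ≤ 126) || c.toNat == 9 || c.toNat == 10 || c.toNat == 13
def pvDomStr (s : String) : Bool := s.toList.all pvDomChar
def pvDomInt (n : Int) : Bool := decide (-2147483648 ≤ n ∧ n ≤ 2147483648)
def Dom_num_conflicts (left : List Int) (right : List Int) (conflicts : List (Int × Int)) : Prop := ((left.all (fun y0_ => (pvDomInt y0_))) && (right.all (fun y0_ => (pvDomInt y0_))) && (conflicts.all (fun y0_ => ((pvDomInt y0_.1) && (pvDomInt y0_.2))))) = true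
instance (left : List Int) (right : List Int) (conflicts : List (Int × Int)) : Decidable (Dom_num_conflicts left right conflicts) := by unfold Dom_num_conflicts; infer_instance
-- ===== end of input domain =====

-- B replaces A's nested per-hero rescans of `conflicts` by per-group multiplicity counters
-- plus ONE pass over `conflicts` adding count(l)·[r in group] (objective: faster).


-- ===== PORT A =====
def num_conflicts (left : List Int) (right : List Int) (conflicts : List (Int × Int)) : Int :=
  -- conf = 0; loop over left rescanning conflicts; then the same over right
  let conf : Int := left.foldl (fun conf hero =>
    conflicts.foldl (fun conf p =>
      if hero == p.1 && left.contains p.2 then conf + 1 else conf) conf) 0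
  right.foldl (fun conf hero =>
    conflicts.foldl (fun conf p =>
      if hero == p.1 && right.contains p.2 then conf + 1 else conf) conf) conf

-- ===== PORT B =====
def num_conflicts_alt (left : List Int) (right : List Int) (conflicts : List (Int × Int)) : Int :=
  -- cl = {}; for h in left: cl[h] = cl.get(h, 0) + 1   (and cr for right)
  let cl : PySem.Dict Int Int :=
    left.foldl (fun d h => d.insert h (d.getD h 0 + 1)) PySem.Dict.empty
  let cr : PySem.Dict Int Int :=
    right.foldl (fun d h => d.insert h (d.getD h 0 + 1)) PySem.Dict.empty
  -- conf = 0; for (l, r) in conflicts: if r in cl: conf += cl.get(l, 0); if r in cr: conf += cr.get(l, 0)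
  conflicts.foldl (fun conf p =>
    let conf := if cl.contains p.2 then conf + cl.getD p.1 0 else conf
    if cr.contains p.2 then conf + cr.getD p.1 0 else conf) 0

-- ===== PRECONDITION & SPEC =====
def Spec_num_conflicts (left : List Int) (right : List Int) (conflicts : List (Int × Int)) (out : Int) : Prop := out = num_conflicts_alt left right conflicts
instance (left : List Int) (right : List Int) (conflicts : List (Int × Int)) (out : Int) : Decidable (Spec_num_conflicts left right conflicts out) := by unfold Spec_num_conflicts; infer_instance

-- ===== CLAIM (what is proved, stated in full; the proofs are below) =====
def Claim_equal_num_conflicts : Prop := ∀ (left : List Int) (right : List Int) (conflicts : List (Int × Int)), Dom_num_conflicts left right conflicts → Spec_num_conflicts left right conflicts (num_conflicts left right conflicts)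

-- ===== LEMMAS AND PROOFS =====

-- adding one hero h to the counted multitude: its per-pair indicator sum plus the old sum
theorem step_sum (h : Int) (t g : List Int) (cs : List (Int × Int)) :
    (List.countP (fun p => h == p.1 && g.contains p.2) cs : Int)
      + (cs.map (fun p => if g.contains p.2 then (List.count p.1 t : Int) else 0)).sum
    = (cs.map (fun p => if g.contains p.2 then (List.count p.1 (h :: t) : Int) else 0)).sum := by
  induction cs with
  | nil => simp
  | cons q cs' ih =>
    rw [List.countP_cons, List.map_cons, List.sum_cons, List.map_cons, List.sum_cons, ← ih]
    have hhead : (if g.contains q.2 then (List.count q.1 (h :: t) : Int) else 0)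
        = (if g.contains q.2 then (List.count q.1 t : Int) else 0)
          + (if (h == q.1 && g.contains q.2) then (1 : Int) else 0) := by
      by_cases hm : q.2 ∈ g
      · by_cases he : h = q.1
        · subst he
          simp [hm]
        · simp [hm, he]
      · simp [hm]
    rw [hhead]
    push_cast
    split_ifs <;> ring

-- A's double loop over a hero group is the sum over conflicts of count(l)·[r in group]
theorem a_loop_sum (heroes g : List Int) (cs : List (Int × Int)) (c : Int) :
    heroes.foldl (fun conf hero =>
      cs.foldl (fun conf p =>
        if hero == p.1 && g.contains p.2 then conf + 1 else conf) conf) c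
    = c + (cs.map (fun p => if g.contains p.2 then (List.count p.1 heroes : Int) else 0)).sum := by
  induction heroes generalizing c with
  | nil => simp
  | cons h t ih =>
    simp only [List.foldl_cons]
    rw [PySem.List.foldl_if_add_one (fun p => h == p.1 && g.contains p.2) cs c, ih]
    rw [add_assoc, step_sum]

-- B's single pass over conflicts is the sum of the two per-group contributions
theorem b_loop_sum (left right : List Int) (cs : List (Int × Int)) :
    cs.foldl (fun conf p =>
      let conf := if (PySem.Dict.counter left).contains p.2 then conf + (PySem.Dict.counter left).getD p.1 0 else conf
      if (PySem.Dict.counter right).contains p.2 then conf + (PySem.Dict.counter right).getD p.1 0 else conf) 0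
    = (cs.map (fun p => if left.contains p.2 then (List.count p.1 left : Int) else 0)).sum
      + (cs.map (fun p => if right.contains p.2 then (List.count p.1 right : Int) else 0)).sum := by
  have hstep : (fun (conf : Int) (p : Int × Int) =>
      let conf := if (PySem.Dict.counter left).contains p.2 then conf + (PySem.Dict.counter left).getD p.1 0 else conf
      if (PySem.Dict.counter right).contains p.2 then conf + (PySem.Dict.counter right).getD p.1 0 else conf)
    = (fun conf p => conf +
        ((if left.contains p.2 then (List.count p.1 left : Int) else 0)
          + (if right.contains p.2 then (List.count p.1 right : Int) else 0))) := by
    funext conf p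
    simp only [PySem.Dict.contains_counter, PySem.Dict.getD_counter]
    split_ifs <;> ring
  rw [hstep, PySem.List.foldl_add, PySem.List.sum_map_add_int]
  ring

-- ===== VERDICT (by name: the statement is the Claim_ definition above) =====
theorem num_conflicts_spec : Claim_equal_num_conflicts := by
  intro left right conflicts _
  unfold Spec_num_conflicts num_conflicts num_conflicts_alt
  simp only [PySem.Dict.foldl_insert_getD_add_one_eq_counter]
  rw [a_loop_sum left left conflicts 0, a_loop_sum right right conflicts,
    b_loop_sum left right conflicts]
  ring
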